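-- pv_equiv track=rewrite | github.com/RaapTechllc/SEO-Health-Report-System | packages/seo_health_report/scripts/build_report.py | estimate_page_count
-- ===== SOURCE A (Python) =====
-- from typing import Any, Optional
--
-- def estimate_page_count(sections: list[dict[str, Any]]) -> int:
--     """Estimate total page count based on sections."""
--     # Rough estimates per section type
--     estimates = {
--         "cover": 1,
--         "executive_summary": 1,
--         "technical": 5,
--         "content": 5,
--         "ai_visibility": 5,
--         "action_plan": 3,
--         "appendix": 2,
--     }
--
--     total = 0
--     for section in sections:
--         section_type = section.get("type", "")
--         total += estimates.get(section_type, 1)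
--
--     return total
-- ===== SOURCE B (Python) =====
-- def estimate_page_count(sections: list) -> int:
--     """Estimate total page count based on sections."""
--     # Every section contributes a base of 1 page (covers the default and the
--     # 1-page types); heavier types add a surcharge on top, counted per type.
--     types = [section.get("type", "") for section in sections]
--     total = len(types)
--     total += 4 * (types.count("technical") + types.count("content")
--                   + types.count("ai_visibility"))
--     total += 2 * types.count("action_plan")
--     total += 1 * types.count("appendix")
--     return total
-- ===== Notes on version B (the rewrite author's own statement) =====
-- stated objective: alternative
-- what changed: B drops the per-element dict-lookup accumulation: it extracts the type list once, starts from len(sections) as a base of 1 page each, and adds per-type surcharges computed with list.count for the heavier types (arithmetic tally instead of a lookup loop).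
import Mathlib
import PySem

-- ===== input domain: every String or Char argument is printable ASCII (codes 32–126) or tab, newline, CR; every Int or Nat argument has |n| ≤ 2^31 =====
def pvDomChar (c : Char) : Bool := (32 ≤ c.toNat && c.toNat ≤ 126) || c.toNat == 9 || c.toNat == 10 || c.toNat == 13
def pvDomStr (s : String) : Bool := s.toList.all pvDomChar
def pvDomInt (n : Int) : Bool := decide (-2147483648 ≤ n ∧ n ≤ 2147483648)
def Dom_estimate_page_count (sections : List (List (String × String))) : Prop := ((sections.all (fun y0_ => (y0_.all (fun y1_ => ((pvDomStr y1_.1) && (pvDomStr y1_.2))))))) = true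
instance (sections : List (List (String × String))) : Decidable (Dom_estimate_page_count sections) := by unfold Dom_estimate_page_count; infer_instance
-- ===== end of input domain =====

-- B replaces A's per-element dict-lookup accumulation by an arithmetic tally: base 1 per section plus per-type surcharges via list.count (alternative decomposition, same cost).


-- ===== PORT A =====
def pvEstimates : PySem.Dict String Int := PySem.Dict.mk
  [("cover", 1), ("executive_summary", 1), ("technical", 5), ("content", 5),
   ("ai_visibility", 5), ("action_plan", 3), ("appendix", 2)]

def estimate_page_count (sections : List (List (String × String))) : Int :=
  sections.foldl (fun total sec =>
    let section_type := (PySem.Dict.mk sec).getD "type" ""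
    total + pvEstimates.getD section_type 1) 0

-- ===== PORT B =====
def estimate_page_count_alt (sections : List (List (String × String))) : Int :=
  let types := sections.map (fun sec => (PySem.Dict.mk sec).getD "type" "")
  let total : Int := types.length
  let total := total + 4 * ((types.count "technical" : Int) + (types.count "content" : Int)
      + (types.count "ai_visibility" : Int))
  let total := total + 2 * (types.count "action_plan" : Int)
  let total := total + 1 * (types.count "appendix" : Int)
  total

-- ===== PRECONDITION & SPEC =====
def Spec_estimate_page_count (sections : List (List (String × String))) (out : Int) : Prop := out = estimate_page_count_alt sections
instance (sections : List (List (String × String))) (out : Int) : Decidable (Spec_estimate_page_count sections out) := by unfold Spec_estimate_page_count; infer_instance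

-- ===== CLAIM =====
def Claim_equal_estimate_page_count : Prop := ∀ (sections : List (List (String × String))), Dom_estimate_page_count sections → Spec_estimate_page_count sections (estimate_page_count sections)

-- ===== LEMMAS AND PROOFS =====

-- A's per-section estimate, written as base 1 plus per-type surcharges.
theorem pv_weight_eq (t : String) :
    pvEstimates.getD t 1 =
      1 + 4 * ((if t = "technical" then (1:Int) else 0) + (if t = "content" then (1:Int) else 0)
        + (if t = "ai_visibility" then (1:Int) else 0))
      + 2 * (if t = "action_plan" then (1:Int) else 0)
      + (if t = "appendix" then (1:Int) else 0) := by
  by_cases h1 : t = "cover"; · subst h1; decide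
  by_cases h2 : t = "executive_summary"; · subst h2; decide
  by_cases h3 : t = "technical"; · subst h3; decide
  by_cases h4 : t = "content"; · subst h4; decide
  by_cases h5 : t = "ai_visibility"; · subst h5; decide
  by_cases h6 : t = "action_plan"; · subst h6; decide
  by_cases h7 : t = "appendix"; · subst h7; decide
  have hc : pvEstimates.contains t = false := by
    simp [pvEstimates, PySem.Dict.contains_mk]
    tauto
  rw [PySem.Dict.getD_of_not_contains (h := hc)]
  simp [h3, h4, h5, h6, h7]

-- The sum of A's per-element weights equals B's tally formula, for any list of types.
set_option maxRecDepth 4000 in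
theorem pv_sum_weights (l : List String) :
    (l.map (fun t => pvEstimates.getD t 1)).sum =
      (l.length : Int)
      + 4 * ((l.count "technical" : Int) + (l.count "content" : Int) + (l.count "ai_visibility" : Int))
      + 2 * (l.count "action_plan" : Int)
      + (l.count "appendix" : Int) := by
  induction l with
  | nil => simp
  | cons a l ih =>
    simp only [List.map_cons, List.sum_cons, List.count_cons, List.length_cons, ih,
      pv_weight_eq a, beq_iff_eq]
    push_cast
    split_ifs <;> omega

-- Bridge: A's per-section sum as a sum over the extracted type list.
theorem pv_sum_weights_sections (ss : List (List (String × String))) :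
    (ss.map (fun sec => pvEstimates.getD ((PySem.Dict.mk sec).getD "type" "") 1)).sum
    = ((ss.map (fun sec => (PySem.Dict.mk sec).getD "type" "")).map
        (fun t => pvEstimates.getD t 1)).sum := by
  induction ss with
  | nil => rfl
  | cons a ss ih => simp [ih]

theorem estimate_page_count_eq (sections : List (List (String × String))) :
    estimate_page_count sections = estimate_page_count_alt sections := by
  unfold estimate_page_count estimate_page_count_alt
  rw [PySem.List.foldl_add _ (fun sec : List (String × String) =>
    pvEstimates.getD ((PySem.Dict.mk sec).getD "type" "") 1)]
  rw [pv_sum_weights_sections, pv_sum_weights]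
  simp only [List.length_map]
  ring

-- ===== VERDICT =====
theorem estimate_page_count_spec : Claim_equal_estimate_page_count := by
  intro sections _
  unfold Spec_estimate_page_count
  exact estimate_page_count_eq sections
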